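-- pv_equiv track=rewrite | github.com/IngeRi92/python-study-progress | Tsükkel/min_block.py | min_block
-- ===== SOURCE A (Python) =====
-- def min_block(s: str) -> int:
--     """
--     Given a string, return the length of the smallest "block" in the string.
--
--     A block is a run of adjacent chars that are the same.
--     """
--     if len(s) == 0:
--         return 0
--
--     block_lengths = []
--     current_block_length = 1
--     for position in range(1, len(s)):
--         if s[position] == s[position - 1]:
--             current_block_length += 1
--         else:
--             block_lengths.append(current_block_length)
--             current_block_length = 1
--     block_lengths.append(current_block_length)
--     return min(block_lengths)
-- ===== SOURCE B (Python) =====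
-- def min_block(s: str) -> int:
--     """Boundary-index formulation: collect the positions where a new run
--     starts, then take the minimum of consecutive boundary differences."""
--     if len(s) == 0:
--         return 0
--     bounds = [0] + [i for i, (a, b) in enumerate(zip(s, s[1:]), 1) if a != b] + [len(s)]
--     return min(b - a for a, b in zip(bounds, bounds[1:]))
-- ===== Notes on version B (the rewrite author's own statement) =====
-- stated objective: alternative
-- what changed: A threads a running block counter and a list of finished block lengths through one indexed scan; B instead builds the explicit list of run-boundary indices (0, every i with s[i]!=s[i-1], len(s)) and takes the minimum of consecutive boundary differences.
import Mathlib
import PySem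

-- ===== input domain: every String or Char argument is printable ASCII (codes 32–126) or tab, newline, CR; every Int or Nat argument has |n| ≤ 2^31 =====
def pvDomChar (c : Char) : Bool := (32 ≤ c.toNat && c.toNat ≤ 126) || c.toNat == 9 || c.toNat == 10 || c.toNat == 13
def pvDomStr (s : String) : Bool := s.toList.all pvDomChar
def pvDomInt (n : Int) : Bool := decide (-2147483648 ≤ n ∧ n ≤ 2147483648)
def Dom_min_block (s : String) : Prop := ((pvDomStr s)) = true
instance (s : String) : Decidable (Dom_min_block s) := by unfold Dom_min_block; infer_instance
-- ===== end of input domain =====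

-- B replaces A's single pass threading a running count by an explicit boundary-index
-- construction followed by a minimum over consecutive differences (objective: alternative).

-- ===== PORT A =====
-- literal port of A: scan positions 1..len-1, thread (block_lengths, current_block_length)
def min_block (s : String) : Int :=
  if PySem.Str.len s = 0 then 0
  else
    let cs := s.toList
    let st := (PySem.List.pyRange 1 (PySem.Str.len s) 1).foldl
      (fun (st : List Int × Int) pos =>
        if PySem.List.pyGetD cs pos ' ' = PySem.List.pyGetD cs (pos - 1) ' ' then
          (st.1, st.2 + 1)
        else
          (st.1 ++ [st.2], 1))
      ([], 1)
    let block_lengths := st.1 ++ [st.2]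
    (PySem.List.min? block_lengths (fun x => x)).getD 0  -- block_lengths is never empty

-- ===== PORT B =====
-- literal port of Source B: bounds = [0] + [i for i,(a,b) in enumerate(zip(s, s[1:]), 1) if a != b] + [len(s)];
-- min(b - a for a, b in zip(bounds, bounds[1:])).  s[1:]/bounds[1:] ported via PySem.List.slice.
def min_block_alt (s : String) : Int :=
  if PySem.Str.len s = 0 then 0
  else
    let cs := s.toList
    let pairs := cs.zip (PySem.List.slice cs (some 1) none)
    let bounds : List Int :=
      [0] ++ ((PySem.List.enumerate pairs 1).filter (fun ip => ip.2.1 ≠ ip.2.2)).map (·.1)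
        ++ [PySem.Str.len s]
    let diffs := (bounds.zip (PySem.List.slice bounds (some 1) none)).map (fun ab => ab.2 - ab.1)
    (PySem.List.min? diffs (fun x => x)).getD 0  -- diffs is never empty

-- ===== PRECONDITION & SPEC =====
def Spec_min_block (s : String) (out : Int) : Prop := out = min_block_alt s
instance (s : String) (out : Int) : Decidable (Spec_min_block s out) := by unfold Spec_min_block; infer_instance

-- ===== CLAIM (what is proved, stated in full; the proofs are below) =====
def Claim_equal_min_block : Prop := ∀ (s : String), Dom_min_block s → Spec_min_block s (min_block s)

-- ===== LEMMAS AND PROOFS =====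

-- A's loop body, on the pair (previous char, current char)
def mbStep (st : List Int × Int) (prev cur : Char) : List Int × Int :=
  if cur = prev then (st.1, st.2 + 1) else (st.1 ++ [st.2], 1)

-- indices (counted from i) of the adjacent pairs that differ
def mbChanges (P : List (Char × Char)) (i : Int) : List Int :=
  ((PySem.List.enumerate P i).filter (fun ip => ip.2.1 ≠ ip.2.2)).map (·.1)

-- consecutive differences of a list
def mbDiffs (l : List Int) : List Int := (l.zip l.tail).map (fun ab => ab.2 - ab.1)

-- A's index-driven loop is a fold over the list of adjacent character pairs
theorem mb_fold_idx (g : (List Int × Int) → Char → Char → (List Int × Int)) :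
    ∀ (suf pre : List Char) (x : Char) (init : List Int × Int),
    (PySem.List.pyRange ((pre.length : Int) + 1) ((pre.length : Int) + 1 + suf.length) 1).foldl
      (fun st pos =>
        g st (PySem.List.pyGetD (pre ++ x :: suf) (pos - 1) ' ')
             (PySem.List.pyGetD (pre ++ x :: suf) pos ' ')) init
    = ((x :: suf).zip suf).foldl (fun st p => g st p.1 p.2) init := by
  intro suf
  induction suf with
  | nil =>
    intro pre x init
    have : PySem.List.pyRange ((pre.length : Int) + 1) ((pre.length : Int) + 1 + ([] : List Char).length) 1 = [] := by
      simp [PySem.List.pyRange]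
    rw [this]; rfl
  | cons y rest ih =>
    intro pre x init
    have hcons : PySem.List.pyRange ((pre.length : Int) + 1) ((pre.length : Int) + 1 + (y :: rest).length) 1
        = ((pre.length : Int) + 1) :: PySem.List.pyRange ((pre.length : Int) + 1 + 1) ((pre.length : Int) + 1 + (y :: rest).length) 1 := by
      apply PySem.List.pyRange_one_cons
      push_cast [List.length_cons]; omega
    rw [hcons, List.foldl_cons]
    have g1 : PySem.List.pyGetD (pre ++ x :: y :: rest) (((pre.length : Int) + 1) - 1) ' ' = x := by
      have h1 : ((pre.length : Int) + 1) - 1 = (pre.length : Int) := by ring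
      rw [h1]
      simp [PySem.List.pyGetD_natCast]
    have g2 : PySem.List.pyGetD (pre ++ x :: y :: rest) ((pre.length : Int) + 1) ' ' = y := by
      have el : pre ++ x :: y :: rest = (pre ++ [x]) ++ y :: rest := by simp
      have h2 : ((pre.length : Int) + 1) = (((pre ++ [x]).length : Nat) : Int) := by
        push_cast [List.length_append, List.length_cons, List.length_nil]; ring
      rw [el, h2, PySem.List.pyGetD_natCast]
      simp [List.getD_eq_getElem?_getD]
    rw [g1, g2]
    have ihs := ih (pre ++ [x]) y (g init x y)
    have hb : ((pre ++ [x]).length : Int) + 1 = (pre.length : Int) + 1 + 1 := by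
      push_cast [List.length_append, List.length_cons, List.length_nil]; ring
    have he : ((pre.length : Int) + 1 + 1) + (rest.length : Int) = (pre.length : Int) + 1 + ((y :: rest).length : Int) := by
      push_cast [List.length_append, List.length_cons, List.length_nil]; ring
    rw [hb, he, show (pre ++ [x]) ++ y :: rest = pre ++ x :: y :: rest from by simp] at ihs
    rw [ihs]; rfl

-- invariant of A's loop: the collected run lengths are the consecutive differences of
-- the boundary list  bnd :: changed-indices ++ [end]
theorem mbDiffs_cons_cons (x y : Int) (l : List Int) :
    mbDiffs (x :: y :: l) = (y - x) :: mbDiffs (y :: l) := rfl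

theorem mb_inv : ∀ (P : List (Char × Char)) (i bnd : Int) (acc : List Int),
    (P.foldl (fun st p => mbStep st p.1 p.2) (acc, i - bnd)).1
      ++ [(P.foldl (fun st p => mbStep st p.1 p.2) (acc, i - bnd)).2]
    = acc ++ mbDiffs (bnd :: mbChanges P i ++ [i + P.length]) := by
  intro P
  induction P with
  | nil => intro i bnd acc; simp [mbChanges, mbDiffs, PySem.List.enumerate]
  | cons p rest ih =>
    intro i bnd acc
    obtain ⟨a, b⟩ := p
    have hlen : ((List.length (⟨a, b⟩ :: rest) : Int)) = (rest.length : Int) + 1 := by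
      push_cast [List.length_cons]; ring
    by_cases h : b = a
    · have e1 : mbStep (acc, i - bnd) a b = (acc, (i + 1) - bnd) := by
        simp [mbStep, h]; ring
      have e2 : mbChanges (⟨a, b⟩ :: rest) i = mbChanges rest (i + 1) := by
        simp [mbChanges, PySem.List.enumerate_cons, h]
      rw [List.foldl_cons]
      show ((rest.foldl (fun st p => mbStep st p.1 p.2) (mbStep (acc, i - bnd) a b)).1
        ++ [(rest.foldl (fun st p => mbStep st p.1 p.2) (mbStep (acc, i - bnd) a b)).2]) = _
      rw [e1, ih (i + 1) bnd acc, e2, hlen]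
      have : i + ((rest.length : Int) + 1) = (i + 1) + rest.length := by ring
      rw [this]
    · have e1 : mbStep (acc, i - bnd) a b = (acc ++ [i - bnd], (i + 1) - i) := by
        simp [mbStep, h]
      have hab : a ≠ b := fun e => h e.symm
      have e2 : mbChanges (⟨a, b⟩ :: rest) i = i :: mbChanges rest (i + 1) := by
        simp [mbChanges, PySem.List.enumerate_cons, hab]
      rw [List.foldl_cons]
      show ((rest.foldl (fun st p => mbStep st p.1 p.2) (mbStep (acc, i - bnd) a b)).1
        ++ [(rest.foldl (fun st p => mbStep st p.1 p.2) (mbStep (acc, i - bnd) a b)).2]) = _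
      rw [e1, ih (i + 1) i (acc ++ [i - bnd]), e2, hlen]
      have : i + ((rest.length : Int) + 1) = (i + 1) + rest.length := by ring
      rw [this]
      simp [mbDiffs_cons_cons]

-- ===== VERDICT (by name: the statement is the Claim_ definition above) =====
theorem min_block_spec : Claim_equal_min_block := by
  intro s _
  unfold Spec_min_block min_block min_block_alt
  have hlen : PySem.Str.len s = (s.toList.length : Int) := by simp [pysem]
  rcases hcs : s.toList with _ | ⟨x, suf⟩
  · simp [hcs]
  · have hne : (((x :: suf).length : Nat) : Int) ≠ 0 := by push_cast [List.length_cons]; omega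
    rw [hlen, hcs, if_neg hne, if_neg hne]
    dsimp only
    refine congrArg (fun l => (PySem.List.min? l (fun y => y)).getD 0) ?_
    have hA0 : (PySem.List.pyRange 1 (((x :: suf).length : Nat) : Int) 1).foldl
        (fun (st : List Int × Int) pos =>
          if PySem.List.pyGetD (x :: suf) pos ' ' = PySem.List.pyGetD (x :: suf) (pos - 1) ' ' then
            (st.1, st.2 + 1) else (st.1 ++ [st.2], 1)) ([], 1)
        = ((x :: suf).zip suf).foldl (fun st p => mbStep st p.1 p.2) ([], 1) := by
      have h := mb_fold_idx (fun st prev cur => if cur = prev then (st.1, st.2 + 1) else (st.1 ++ [st.2], 1)) suf [] x ([], 1)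
      rw [show ((([] : List Char).length : Int) + 1 + ((suf.length : Nat) : Int)) = (((x :: suf).length : Nat) : Int) from by
        push_cast [List.length_cons, List.length_nil]; ring] at h
      exact h
    rw [hA0]
    have e2 := mb_inv ((x :: suf).zip suf) 1 0 []
    norm_num at e2
    rw [e2]
    rw [PySem.List.slice_from_one, PySem.List.slice_from_one]
    have hn : (1:Int) + ((suf.length : Nat) : Int) = (((x :: suf).length : Nat) : Int) := by
      push_cast [List.length_cons]; ring
    rw [hn]
    rfl
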